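-- pv_equiv track=rewrite | github.com/eunhee-dev/problem-solving | 0x10_dynamic-programming/9465/solve.py | solve
-- ===== SOURCE A (Python) =====
-- def solve(n: int, sticker: list[list[int]]) -> int:
--     for i, row in enumerate(sticker):
--         sticker[i] = [0] + row
--
--     dp = [[0] * (n + 1) for _ in range(2)]
--     dp[0][1] = sticker[0][1]
--     dp[1][1] = sticker[1][1]
--
--     for i in range(2, n + 1):
--         dp[0][i] = max(dp[1][i - 1], dp[1][i - 2]) + sticker[0][i]
--         dp[1][i] = max(dp[0][i - 1], dp[0][i - 2]) + sticker[1][i]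
--
--     return max(dp[0][n], dp[1][n])
-- ===== SOURCE B (Python) =====
-- def _mp_add(x, y):
--     if x is None:
--         return y
--     if y is None:
--         return x
--     return x if x >= y else y
--
--
-- def _mp_mul(x, y):
--     if x is None or y is None:
--         return None
--     return x + y
--
--
-- _IDENT = [[0, None, None, None],
--           [None, 0, None, None],
--           [None, None, 0, None],
--           [None, None, None, 0]]
--
--
-- def _mat_mul(a, b):
--     return [[_mp_add(_mp_add(_mp_mul(a[i][0], b[0][j]), _mp_mul(a[i][1], b[1][j])),
--                      _mp_add(_mp_mul(a[i][2], b[2][j]), _mp_mul(a[i][3], b[3][j])))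
--              for j in range(4)] for i in range(4)]
--
--
-- def _mat_vec(m, v):
--     return [_mp_add(_mp_add(_mp_mul(m[i][0], v[0]), _mp_mul(m[i][1], v[1])),
--                     _mp_add(_mp_mul(m[i][2], v[2]), _mp_mul(m[i][3], v[3])))
--             for i in range(4)]
--
--
-- def _col_mat(a, b):
--     return [[None, a, None, a],
--             [b, None, b, None],
--             [0, None, None, None],
--             [None, 0, None, None]]
--
--
-- def _reduce_pairs(mats):
--     out = []
--     i = 0
--     while i + 1 < len(mats):
--         out.append(_mat_mul(mats[i + 1], mats[i]))
--         i += 2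
--     if i < len(mats):
--         out.append(mats[i])
--     return out
--
--
-- def solve(n: int, sticker: list[list[int]]) -> int:
--     # Return-value equivalence only: B does not mutate `sticker` in place (A does).
--     # Each column's DP step is a max-plus linear map on (dp0_i, dp1_i, dp0_{i-1}, dp1_{i-1});
--     # the product of the per-column 4x4 tropical matrices is computed by pairwise
--     # (divide-and-conquer) combination and applied once to the initial state vector.
--     top, bottom = sticker[0], sticker[1]
--     mats = [_col_mat(top[i], bottom[i]) for i in range(1, n)]
--     while len(mats) > 1:
--         mats = _reduce_pairs(mats)
--     p = mats[0] if mats else _IDENT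
--     w = _mat_vec(p, [top[0], bottom[0], 0, 0])
--     return _mp_add(w[0], w[1])
-- ===== Notes on version B (the rewrite author's own statement) =====
-- stated objective: alternative
-- what changed: B reformulates each column's DP step as a max-plus-linear map, builds one 4x4 tropical matrix per column and multiplies them by repeated pairwise (divide-and-conquer style) combination, applying the single composed matrix to the initial state vector, instead of A's left-to-right table-filling DP; B also does not mutate sticker in place.
import Mathlib
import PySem

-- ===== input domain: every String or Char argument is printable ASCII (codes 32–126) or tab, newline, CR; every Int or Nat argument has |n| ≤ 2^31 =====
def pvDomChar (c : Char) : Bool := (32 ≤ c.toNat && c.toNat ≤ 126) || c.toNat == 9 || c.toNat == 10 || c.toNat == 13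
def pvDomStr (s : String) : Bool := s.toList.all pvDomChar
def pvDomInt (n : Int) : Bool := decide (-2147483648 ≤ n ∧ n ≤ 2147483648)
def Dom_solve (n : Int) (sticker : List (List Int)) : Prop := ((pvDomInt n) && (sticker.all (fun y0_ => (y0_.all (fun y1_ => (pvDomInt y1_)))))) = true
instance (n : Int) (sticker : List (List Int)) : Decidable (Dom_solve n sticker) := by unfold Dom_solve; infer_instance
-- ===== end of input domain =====

-- B recasts each DP column step as a max-plus 4×4 matrix and combines the matrices pairwise
-- (divide-and-conquer) before applying the composed matrix once; equivalence is about the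
-- RETURN value only: A mutates `sticker` in place (prepends 0 to each row), B does not.

-- ===== PORT A =====
-- the body of 'for i in range(2, n + 1)': dp[0][i] = …; dp[1][i] = …
def solveStep (s0 s1 : List Int) (p : List Int × List Int) (i : Int) : List Int × List Int :=
  let dp0 := p.1.set i.toNat (max (PySem.List.pyGetD p.2 (i-1) 0) (PySem.List.pyGetD p.2 (i-2) 0) + PySem.List.pyGetD s0 i 0)
  let dp1 := p.2.set i.toNat (max (PySem.List.pyGetD dp0 (i-1) 0) (PySem.List.pyGetD dp0 (i-2) 0) + PySem.List.pyGetD s1 i 0)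
  (dp0, dp1)

def solve (n : Int) (sticker : List (List Int)) : Int :=
  let st := sticker.map (fun row => 0 :: row)        -- sticker[i] = [0] + row
  let s0 := (PySem.List.pyGet? st 0).getD []
  let s1 := (PySem.List.pyGet? st 1).getD []
  let dp0 := (List.replicate (n+1).toNat 0).set 1 (PySem.List.pyGetD s0 1 0)
  let dp1 := (List.replicate (n+1).toNat 0).set 1 (PySem.List.pyGetD s1 1 0)
  let dp := (PySem.List.pyRange 2 (n+1) 1).foldl (solveStep s0 s1) (dp0, dp1)
  max (PySem.List.pyGetD dp.1 n 0) (PySem.List.pyGetD dp.2 n 0)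

-- ===== PORT B =====
-- max-plus 'addition' (_mp_add) and 'multiplication' (_mp_mul); none = -infinity
def mpAdd (x y : Option Int) : Option Int :=
  match x with
  | none => y
  | some a => match y with
    | none => x
    | some b => if a ≥ b then some a else some b

def mpMul (x y : Option Int) : Option Int :=
  match x, y with
  | none, _ => none
  | _, none => none
  | some a, some b => some (a + b)

def identM : List (List (Option Int)) :=
  [[some 0, none, none, none],
   [none, some 0, none, none],
   [none, none, some 0, none],
   [none, none, none, some 0]]

-- a[i][k]; exact for the in-range indices used (every matrix/vector in B is 4×4 / 4-long)
def mget (a : List (List (Option Int))) (i k : Nat) : Option Int := (a.getD i []).getD k none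
def vget (v : List (Option Int)) (k : Nat) : Option Int := v.getD k none

def matMul (a b : List (List (Option Int))) : List (List (Option Int)) :=
  (List.range 4).map (fun i => (List.range 4).map (fun j =>
    mpAdd (mpAdd (mpMul (mget a i 0) (mget b 0 j)) (mpMul (mget a i 1) (mget b 1 j)))
          (mpAdd (mpMul (mget a i 2) (mget b 2 j)) (mpMul (mget a i 3) (mget b 3 j)))))

def matVec (m : List (List (Option Int))) (v : List (Option Int)) : List (Option Int) :=
  (List.range 4).map (fun i =>
    mpAdd (mpAdd (mpMul (mget m i 0) (vget v 0)) (mpMul (mget m i 1) (vget v 1)))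
          (mpAdd (mpMul (mget m i 2) (vget v 2)) (mpMul (mget m i 3) (vget v 3))))

def colMat (a b : Int) : List (List (Option Int)) :=
  [[none, some a, none, some a],
   [some b, none, some b, none],
   [some 0, none, none, none],
   [none, some 0, none, none]]

-- _reduce_pairs: combine adjacent pairs (later matrix composed after earlier one)
def reducePairs : List (List (List (Option Int))) → List (List (List (Option Int)))
  | a :: b :: rest => matMul b a :: reducePairs rest
  | l => l

theorem reducePairs_length_le : ∀ l : List (List (List (Option Int))), (reducePairs l).length ≤ l.length
  | [] => by simp [reducePairs]
  | [a] => by simp [reducePairs]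
  | a :: b :: rest => by
      simp only [reducePairs, List.length_cons]
      have h := reducePairs_length_le rest
      omega

-- 'while len(mats) > 1: mats = _reduce_pairs(mats)' followed by 'mats[0] if mats else _IDENT'
def reduceAll : List (List (List (Option Int))) → List (List (Option Int))
  | [] => identM
  | [m] => m
  | a :: b :: rest => reduceAll (matMul b a :: reducePairs rest)
termination_by l => l.length
decreasing_by
  have h := reducePairs_length_le rest
  simp only [List.length_cons]
  omega

def solve_alt (n : Int) (sticker : List (List Int)) : Int :=
  let top := (PySem.List.pyGet? sticker 0).getD []
  let bottom := (PySem.List.pyGet? sticker 1).getD []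
  let mats := (PySem.List.pyRange 1 n 1).map (fun i => colMat (PySem.List.pyGetD top i 0) (PySem.List.pyGetD bottom i 0))
  let p := reduceAll mats
  let w := matVec p [some ((PySem.List.pyGet? top 0).getD 0), some ((PySem.List.pyGet? bottom 0).getD 0), some 0, some 0]
  (mpAdd (vget w 0) (vget w 1)).getD 0   -- Python returns this int (always `some` on Pre_)

-- ===== PRECONDITION & SPEC =====
-- Pre_ excludes exactly the inputs where A raises IndexError: n < 1, fewer than two rows,
-- or one of the first two rows shorter than n.
def Pre_solve (n : Int) (sticker : List (List Int)) : Prop :=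
  1 ≤ n ∧ 2 ≤ sticker.length ∧ n ≤ ((sticker.getD 0 []).length : Int) ∧ n ≤ ((sticker.getD 1 []).length : Int)
instance (n : Int) (sticker : List (List Int)) : Decidable (Pre_solve n sticker) := by unfold Pre_solve; infer_instance

def pvWitness_solve : Int × List (List Int) := (2, [[1, 2], [3, 4]])

def Spec_solve (n : Int) (sticker : List (List Int)) (out : Int) : Prop := out = solve_alt n sticker
instance (n : Int) (sticker : List (List Int)) (out : Int) : Decidable (Spec_solve n sticker out) := by unfold Spec_solve; infer_instance

-- ===== CLAIM (what is proved, stated in full; the proofs are below) =====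
def Claim_equal_solve : Prop := ∀ (n : Int) (sticker : List (List Int)), Dom_solve n sticker → Pre_solve n sticker → Spec_solve n sticker (solve n sticker)

-- ===== LEMMAS AND PROOFS =====

-- the DP recurrence both programs realise, over the ORIGINAL rows: (fDP top bottom i) = (dp[0][i], dp[1][i])
def fDP (top bottom : List Int) : Nat → Int × Int
  | 0 => (0, 0)
  | 1 => (top.getD 0 0, bottom.getD 0 0)
  | (k+2) =>
      let p := fDP top bottom (k+1)
      let q := fDP top bottom k
      (max p.2 q.2 + top.getD (k+1) 0, max p.1 q.1 + bottom.getD (k+1) 0)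

theorem fDP_succ (top bottom : List Int) (k : Nat) (hk : 1 ≤ k) :
    (fDP top bottom (k+1)).1 = max (fDP top bottom k).2 (fDP top bottom (k-1)).2 + top.getD k 0 ∧
    (fDP top bottom (k+1)).2 = max (fDP top bottom k).1 (fDP top bottom (k-1)).1 + bottom.getD k 0 := by
  obtain ⟨k, rfl⟩ : ∃ k', k = k' + 1 := ⟨k - 1, by omega⟩
  simp [fDP]

-- ---- max-plus algebra on Option Int ----
theorem mpAdd_some (a b : Int) : mpAdd (some a) (some b) = some (max a b) := by
  simp only [mpAdd]
  split_ifs <;> (congr 1; omega)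

theorem mpMul_some (a b : Int) : mpMul (some a) (some b) = some (a + b) := rfl

theorem mpAdd_none_left (x : Option Int) : mpAdd none x = x := rfl
theorem mpAdd_none_right (x : Option Int) : mpAdd x none = x := by cases x <;> rfl

theorem mpAdd_comm (x y : Option Int) : mpAdd x y = mpAdd y x := by
  cases x <;> cases y <;> simp [mpAdd_none_left, mpAdd_none_right, mpAdd_some, max_comm]

theorem mpAdd_assoc (x y z : Option Int) : mpAdd (mpAdd x y) z = mpAdd x (mpAdd y z) := by
  cases x <;> cases y <;> cases z <;>
    simp [mpAdd_none_left, mpAdd_none_right, mpAdd_some, max_assoc]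

theorem mpAdd_left_comm (x y z : Option Int) : mpAdd x (mpAdd y z) = mpAdd y (mpAdd x z) := by
  rw [← mpAdd_assoc, mpAdd_comm x y, mpAdd_assoc]

theorem mpMul_assoc (x y z : Option Int) : mpMul (mpMul x y) z = mpMul x (mpMul y z) := by
  cases x <;> cases y <;> cases z <;> simp [mpMul, Int.add_assoc]

theorem mpMul_add_left (x y z : Option Int) : mpMul x (mpAdd y z) = mpAdd (mpMul x y) (mpMul x z) := by
  cases x <;> cases y <;> cases z <;>
    simp only [mpMul, mpAdd_none_left, mpAdd_none_right, mpAdd_some, mpMul_some,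
      Option.some.injEq] <;> omega

theorem mpMul_add_right (x y z : Option Int) : mpMul (mpAdd x y) z = mpAdd (mpMul x z) (mpMul y z) := by
  cases x <;> cases y <;> cases z <;>
    simp only [mpMul, mpAdd_none_left, mpAdd_none_right, mpAdd_some, mpMul_some,
      Option.some.injEq] <;> omega

-- 16-term rearrangement (swap the two summation orders of a 4×4 max-plus sum)
theorem swap16 (a00 a01 a02 a03 a10 a11 a12 a13 a20 a21 a22 a23 a30 a31 a32 a33 : Option Int) :
    mpAdd (mpAdd (mpAdd (mpAdd a00 a01) (mpAdd a02 a03)) (mpAdd (mpAdd a10 a11) (mpAdd a12 a13))) (mpAdd (mpAdd (mpAdd a20 a21) (mpAdd a22 a23)) (mpAdd (mpAdd a30 a31) (mpAdd a32 a33)))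
  = mpAdd (mpAdd (mpAdd (mpAdd a00 a10) (mpAdd a20 a30)) (mpAdd (mpAdd a01 a11) (mpAdd a21 a31))) (mpAdd (mpAdd (mpAdd a02 a12) (mpAdd a22 a32)) (mpAdd (mpAdd a03 a13) (mpAdd a23 a33))) := by
  simp only [mpAdd_assoc]
  simp [mpAdd_comm, mpAdd_left_comm]

theorem range4 : List.range 4 = [0, 1, 2, 3] := rfl

theorem matVec_matMul (a b : List (List (Option Int))) (v : List (Option Int)) :
    matVec (matMul a b) v = matVec a (matVec b v) := by
  simp only [matVec, matMul, range4, List.map_cons, List.map_nil, mget, vget,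
    List.getD_cons_zero, List.getD_cons_succ, List.getD_nil]
  simp only [List.cons.injEq, and_true]
  refine ⟨?_, ?_, ?_, ?_⟩ <;>
  · simp only [mpMul_add_right, mpMul_assoc, mpMul_add_left]
    apply swap16

theorem mpMul_zero_left (x : Option Int) : mpMul (some 0) x = x := by cases x <;> simp [mpMul]
theorem mpMul_none_left (x : Option Int) : mpMul none x = none := rfl

theorem matVec_ident (x0 x1 x2 x3 : Option Int) :
    matVec identM [x0, x1, x2, x3] = [x0, x1, x2, x3] := by
  simp [matVec, identM, range4, mget, vget, mpMul_none_left, mpMul_zero_left,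
    mpAdd_none_left, mpAdd_none_right]

theorem foldl_matVec_reducePairs : ∀ (mats : List (List (List (Option Int)))) (v : List (Option Int)),
    (reducePairs mats).foldl (fun v m => matVec m v) v = mats.foldl (fun v m => matVec m v) v
  | [], v => rfl
  | [a], v => rfl
  | a :: b :: rest, v => by
      simp only [reducePairs, List.foldl_cons]
      rw [matVec_matMul]
      exact foldl_matVec_reducePairs rest _

theorem reduceAll_spec : ∀ (mats : List (List (List (Option Int)))) (x0 x1 x2 x3 : Option Int),
    matVec (reduceAll mats) [x0, x1, x2, x3] = mats.foldl (fun v m => matVec m v) [x0, x1, x2, x3]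
  | [], x0, x1, x2, x3 => by simp [reduceAll, matVec_ident]
  | [m], x0, x1, x2, x3 => by simp [reduceAll]
  | a :: b :: rest, x0, x1, x2, x3 => by
      rw [show reduceAll (a :: b :: rest) = reduceAll (matMul b a :: reducePairs rest) from by
            rw [reduceAll],
        reduceAll_spec (matMul b a :: reducePairs rest) x0 x1 x2 x3]
      simp only [List.foldl_cons]
      rw [matVec_matMul]
      exact foldl_matVec_reducePairs rest _
termination_by mats => mats.length
decreasing_by
  have h := reducePairs_length_le rest
  simp only [List.length_cons]
  omega

-- one column step of B, on an all-`some` state vector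
theorem colMat_app (a b x0 x1 x2 x3 : Int) :
    matVec (colMat a b) [some x0, some x1, some x2, some x3]
      = [some (max x1 x3 + a), some (max x0 x2 + b), some x0, some x1] := by
  simp only [matVec, colMat, range4, List.map_cons, List.map_nil, mget, vget,
    List.getD_cons_zero, List.getD_cons_succ, mpMul,
    mpAdd_none_left, mpAdd_none_right, mpAdd_some]
  simp only [List.cons.injEq, Option.some.injEq, and_true]
  omega

-- B's matrix chain realises fDP
theorem fDP_B (top bottom : List Int) (j : Nat) : ∀ (k : Nat),
    (PySem.List.pyRange ((k:Int)+1) ((k:Int)+1+(j:Int)) 1).foldl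
      (fun v i => matVec (colMat (PySem.List.pyGetD top i 0) (PySem.List.pyGetD bottom i 0)) v)
      [some (fDP top bottom (k+1)).1, some (fDP top bottom (k+1)).2, some (fDP top bottom k).1, some (fDP top bottom k).2]
    = [some (fDP top bottom (k+1+j)).1, some (fDP top bottom (k+1+j)).2, some (fDP top bottom (k+j)).1, some (fDP top bottom (k+j)).2] := by
  induction j with
  | zero =>
    intro k
    rw [PySem.List.pyRange_one_eq_nil (by omega)]
    simp
  | succ j ih =>
    intro k
    rw [PySem.List.pyRange_one_cons (by push_cast; omega), List.foldl_cons]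
    have hf := fDP_succ top bottom (k+1) (by omega)
    have hstep : matVec (colMat (PySem.List.pyGetD top ((k:Int)+1) 0) (PySem.List.pyGetD bottom ((k:Int)+1) 0))
        [some (fDP top bottom (k+1)).1, some (fDP top bottom (k+1)).2, some (fDP top bottom k).1, some (fDP top bottom k).2]
        = [some (fDP top bottom (k+2)).1, some (fDP top bottom (k+2)).2, some (fDP top bottom (k+1)).1, some (fDP top bottom (k+1)).2] := by
      rw [colMat_app]
      rw [show ((k:Int) + 1) = (((k + 1 : Nat)) : Int) from by push_cast; ring,
        PySem.List.pyGetD_natCast, PySem.List.pyGetD_natCast]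
      simp only [Nat.add_sub_cancel] at hf
      rw [← hf.1, ← hf.2]
    rw [hstep]
    have hrw1 : (k:Int) + 1 + 1 = (((k+1 : Nat)) : Int) + 1 := by push_cast; ring
    have hrw2 : (k:Int) + 1 + ((j+1 : Nat) : Int) = (((k+1 : Nat)) : Int) + 1 + (j : Nat) := by push_cast; ring
    rw [hrw1, hrw2]
    have := ih (k+1)
    simpa [show k+1+1 = k+2 from rfl, show k+1+1+j = k+1+(j+1) by omega, show k+1+j = k+(j+1) by omega] using this

theorem solve_alt_eq (n : Int) (sticker : List (List Int)) (h : Pre_solve n sticker) :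
    solve_alt n sticker = max (fDP (sticker.getD 0 []) (sticker.getD 1 []) n.toNat).1 (fDP (sticker.getD 0 []) (sticker.getD 1 []) n.toNat).2 := by
  obtain ⟨h1, h2, h3, h4⟩ := h
  obtain ⟨top, bottom, rest, rfl⟩ : ∃ top bottom rest, sticker = top :: bottom :: rest := by
    cases sticker with
    | nil => simp at h2
    | cons a t => cases t with
      | nil => simp at h2
      | cons b r => exact ⟨a, b, r, rfl⟩
  simp only [List.getD_cons_zero, List.getD_cons_succ] at h3 h4 ⊢
  set m := n.toNat with hm
  have hn : n = (m : Int) := by omega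
  have hm1 : 1 ≤ m := by omega
  have e1 : PySem.List.pyGet? (top :: bottom :: rest) 1 = some bottom := by
    simp [PySem.List.pyGet?, PySem.List.pyIdx?]
  rw [hn]
  simp only [solve_alt, e1, PySem.List.pyGet?_zero_cons, Option.getD_some]
  rw [reduceAll_spec]
  have hinit : [some ((PySem.List.pyGet? top 0).getD 0), some ((PySem.List.pyGet? bottom 0).getD 0), some (0:Int), some (0:Int)]
      = [some (fDP top bottom 1).1, some (fDP top bottom 1).2, some (fDP top bottom 0).1, some (fDP top bottom 0).2] := by
    simp [fDP, PySem.List.pyGet?_zero, List.getD_eq_getElem?_getD]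
  rw [hinit, List.foldl_map]
  have := fDP_B top bottom (m-1) 0
  rw [show ((0:Nat) : Int) + 1 = 1 from by norm_num, show (1 : Int) + ((m - 1 : Nat) : Int) = (m : Int) from by omega,
    show 0 + 1 + (m - 1) = m from by omega, show 0 + (m - 1) = m - 1 from by omega] at this
  simp only [Nat.zero_add] at this
  rw [this]
  simp only [vget, List.getD_cons_zero, List.getD_cons_succ, mpAdd_some, Option.getD_some]

theorem fDP_A (top bottom : List Int) (j : Nat) : ∀ (k : Nat) (dp0 dp1 : List Int),
    1 ≤ k → k + j < dp0.length → k + j < dp1.length →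
    dp0.getD k 0 = (fDP top bottom k).1 → dp0.getD (k-1) 0 = (fDP top bottom (k-1)).1 →
    dp1.getD k 0 = (fDP top bottom k).2 → dp1.getD (k-1) 0 = (fDP top bottom (k-1)).2 →
    ((PySem.List.pyRange ((k:Int)+1) ((k:Int)+1+(j:Int)) 1).foldl (solveStep (0::top) (0::bottom)) (dp0, dp1)).1.getD (k+j) 0
        = (fDP top bottom (k+j)).1
    ∧ ((PySem.List.pyRange ((k:Int)+1) ((k:Int)+1+(j:Int)) 1).foldl (solveStep (0::top) (0::bottom)) (dp0, dp1)).2.getD (k+j) 0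
        = (fDP top bottom (k+j)).2 := by
  induction j with
  | zero =>
    intro k dp0 dp1 hk hl0 hl1 i0 _ i1 _
    rw [PySem.List.pyRange_one_eq_nil (by omega)]
    simpa using ⟨i0, i1⟩
  | succ j ih =>
    intro k dp0 dp1 hk hl0 hl1 i0 i0' i1 i1'
    have hk1 : k + 1 < dp0.length := by omega
    have hk1' : k + 1 < dp1.length := by omega
    rw [PySem.List.pyRange_one_cons (by push_cast; omega), List.foldl_cons]
    have hf := fDP_succ top bottom k hk
    have hstep : solveStep (0::top) (0::bottom) (dp0, dp1) ((k:Int)+1)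
        = (dp0.set (k+1) ((fDP top bottom (k+1)).1), dp1.set (k+1) ((fDP top bottom (k+1)).2)) := by
      unfold solveStep
      have gA : ∀ (l : List Int), PySem.List.pyGetD l ((k:Int) + 1 - 1) 0 = l.getD k 0 := fun l => by
        rw [show ((k:Int) + 1 - 1) = ((k : Nat) : Int) from by omega, PySem.List.pyGetD_natCast]
      have gB : ∀ (l : List Int), PySem.List.pyGetD l ((k:Int) + 1 - 2) 0 = l.getD (k-1) 0 := fun l => by
        rw [show ((k:Int) + 1 - 2) = (((k - 1 : Nat)) : Int) from by omega, PySem.List.pyGetD_natCast]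
      have gC : ∀ (l : List Int), PySem.List.pyGetD l ((k:Int) + 1) 0 = l.getD (k+1) 0 := fun l => by
        rw [show ((k:Int) + 1) = (((k + 1 : Nat)) : Int) from by push_cast; ring, PySem.List.pyGetD_natCast]
      have gT : ((k:Int) + 1).toNat = k + 1 := by omega
      have eqk : ∀ (x : Int), (dp0.set (k+1) x).getD k 0 = dp0.getD k 0 := fun x => by
        simp [List.getD_eq_getElem?_getD, List.getElem?_set_ne (show k+1 ≠ k by omega)]
      have eqk1 : ∀ (x : Int), (dp0.set (k+1) x).getD (k-1) 0 = dp0.getD (k-1) 0 := fun x => by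
        simp [List.getD_eq_getElem?_getD, List.getElem?_set_ne (show k+1 ≠ k-1 by omega)]
      simp only [gA, gB, gC, gT, List.getD_cons_succ, eqk, eqk1]
      rw [i0, i0', i1, i1', ← hf.1, ← hf.2]
    rw [hstep]
    have hrw1 : (k:Int) + 1 + 1 = (((k+1 : Nat)) : Int) + 1 := by push_cast; ring
    have hrw2 : (k:Int) + 1 + ((j+1 : Nat) : Int) = (((k+1 : Nat)) : Int) + 1 + (j : Nat) := by push_cast; ring
    rw [hrw1, hrw2]
    have := ih (k+1) (dp0.set (k+1) ((fDP top bottom (k+1)).1)) (dp1.set (k+1) ((fDP top bottom (k+1)).2))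
      (by omega) (by simpa using by omega) (by simpa using by omega)
      (by simp [List.getD_eq_getElem?_getD, List.getElem?_set_self hk1])
      (by simp [List.getD_eq_getElem?_getD]
          rw [← List.getD_eq_getElem?_getD]; simpa using i0)
      (by simp [List.getD_eq_getElem?_getD, List.getElem?_set_self hk1'])
      (by simp [List.getD_eq_getElem?_getD]
          rw [← List.getD_eq_getElem?_getD]; simpa using i1)
    simpa [show k+1+j = k+(j+1) by omega] using this

theorem solve_eq (n : Int) (sticker : List (List Int)) (h : Pre_solve n sticker) :
    solve n sticker = max (fDP (sticker.getD 0 []) (sticker.getD 1 []) n.toNat).1 (fDP (sticker.getD 0 []) (sticker.getD 1 []) n.toNat).2 := by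
  obtain ⟨h1, h2, h3, h4⟩ := h
  obtain ⟨top, bottom, rest, rfl⟩ : ∃ top bottom rest, sticker = top :: bottom :: rest := by
    cases sticker with
    | nil => simp at h2
    | cons a t => cases t with
      | nil => simp at h2
      | cons b r => exact ⟨a, b, r, rfl⟩
  simp only [List.getD_cons_zero, List.getD_cons_succ] at h3 h4 ⊢
  set m := n.toNat with hm
  have hn : n = (m : Int) := by omega
  have hm1 : 1 ≤ m := by omega
  have e1 : PySem.List.pyGet? ((0 :: top) :: (0 :: bottom) :: rest.map (fun row => 0 :: row)) 1 = some (0 :: bottom) := by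
    simp [PySem.List.pyGet?, PySem.List.pyIdx?]
  have g1 : ∀ (l : List Int), PySem.List.pyGetD l (1 : Int) 0 = l.getD 1 0 := fun l => by
    rw [show (1 : Int) = ((1 : Nat) : Int) from rfl, PySem.List.pyGetD_natCast]
  rw [hn]
  simp only [solve, List.map_cons, PySem.List.pyGet?_zero_cons, Option.getD_some, e1, g1,
    List.getD_cons_succ, show ((m : Int) + 1).toNat = m + 1 from by omega]
  set dp0 := (List.replicate (m+1) (0:Int)).set 1 (top.getD 0 0) with hdp0
  set dp1 := (List.replicate (m+1) (0:Int)).set 1 (bottom.getD 0 0) with hdp1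
  have hl0 : dp0.length = m + 1 := by simp [hdp0]
  have hl1 : dp1.length = m + 1 := by simp [hdp1]
  have hget1 : ∀ (x : Int), ((List.replicate (m+1) (0:Int)).set 1 x).getD 1 0 = x := fun x => by
    simp [List.getD_eq_getElem?_getD, List.getElem?_set_self (show 1 < (List.replicate (m+1) (0:Int)).length from by simp; omega)]
  have hget0 : ∀ (x : Int), ((List.replicate (m+1) (0:Int)).set 1 x).getD 0 0 = 0 := fun x => by
    simp [List.getD_eq_getElem?_getD]
  have := fDP_A top bottom (m-1) 1 dp0 dp1 (by omega) (by omega) (by omega)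
    (by rw [hdp0, hget1]; simp [fDP]) (by rw [hdp0, hget0]; simp [fDP])
    (by rw [hdp1, hget1]; simp [fDP]) (by rw [hdp1, hget0]; simp [fDP])
  rw [show ((1:Nat) : Int) + 1 = 2 from by norm_num, show (2 : Int) + ((m - 1 : Nat) : Int) = (m : Int) + 1 from by omega,
    show 1 + (m - 1) = m from by omega] at this
  rw [PySem.List.pyGetD_natCast, PySem.List.pyGetD_natCast, this.1, this.2]

-- ===== VERDICT (by name: the statement is the Claim_ definition above) =====
theorem solve_spec : Claim_equal_solve := by
  intro n sticker _ hpre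
  unfold Spec_solve
  rw [solve_eq n sticker hpre, solve_alt_eq n sticker hpre]
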